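-- pv_equiv track=rewrite | github.com/ratataca/algorithm-study | week 7. Heap/프로그래머스/1. 더 맵게/cho.py | solution
-- ===== SOURCE A (Python) =====
-- import heapq
--
-- def solution(scoville, K):
--     heapq.heapify(scoville)
--     cnt = 0
--     while scoville[0] < K:
--         a = heapq.heappop(scoville)
--         b = heapq.heappop(scoville)
--         heapq.heappush(scoville, a + b * 2)
--         cnt += 1
--         if len(scoville) == 1 and a + b * 2 < K:
--             return -1
--
--     return cnt
-- ===== SOURCE B (Python) =====
-- def solution(scoville, K):
--     # Two-queue simulation of the mixing heap, all queue operations O(1):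
--     # the originals are sorted descending and consumed with pop() from the end;
--     # the mixed values are produced in nondecreasing order, so appending keeps
--     # that queue sorted and it is consumed through the index j.
--     base = sorted(scoville, reverse=True)   # smallest value at the END
--     mixed = []
--     j = 0
--     cnt = 0
--
--     def smallest():
--         if j == len(mixed):
--             return base[-1]
--         if not base:
--             return mixed[j]
--         return min(base[-1], mixed[j])
--
--     def pop():
--         nonlocal j
--         if j == len(mixed) or (base and base[-1] <= mixed[j]):
--             return base.pop()
--         j += 1
--         return mixed[j - 1]
--
--     while smallest() < K:
--         if len(base) + (len(mixed) - j) == 1: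
--             return -1
--         a = pop()
--         b = pop()
--         mixed.append(a + 2 * b)
--         cnt += 1
--     return cnt
-- ===== Notes on version B (the rewrite author's own statement) =====
-- stated objective: alternative
-- what changed: Replaces the binary heap with the classic two-queue technique: sort once (descending, popped O(1) from the end) and keep the provably nondecreasing mixed values in a second queue consumed by index, popping the smaller of the two fronts each mix.
-- crash fix: On a one-element list whose value is below K, A raises IndexError on the second heappop while B returns -1 (cannot reach K); Pre_ excludes the empty list (both raise) and that singleton case. — e.g. on solution([5], 7): A raises IndexError, B returns -1
import Mathlib
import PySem

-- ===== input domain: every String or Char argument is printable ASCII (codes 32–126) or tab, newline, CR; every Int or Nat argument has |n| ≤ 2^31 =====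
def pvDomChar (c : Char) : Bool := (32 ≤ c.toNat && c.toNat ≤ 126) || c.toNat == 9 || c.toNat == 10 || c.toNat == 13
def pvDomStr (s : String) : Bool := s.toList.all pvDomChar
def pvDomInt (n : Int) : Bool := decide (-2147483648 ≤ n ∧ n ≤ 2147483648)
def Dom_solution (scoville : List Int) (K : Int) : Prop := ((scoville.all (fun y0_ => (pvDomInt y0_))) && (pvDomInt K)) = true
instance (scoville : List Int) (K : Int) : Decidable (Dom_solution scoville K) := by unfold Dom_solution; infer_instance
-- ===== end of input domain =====

-- B replaces A's binary heap with the two-queue technique (sorted originals + FIFO of mixed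
-- values, popping the smaller front); objective: alternative. Return-value equivalence only:
-- the Python A mutates its scoville argument in place (heapify), B does not.

-- ===== PORT A =====
-- heapq on a list of ints is ported by its exact int-queue contract: the queue keeps its minimum
-- at the head (minFront moves the first occurrence of the minimum to the front), heappop = take
-- the head then re-front the minimum, heappush = append then re-front the minimum.
-- The while loop runs at most scoville.length times (the queue shrinks by one per mix), so it is
-- ported with that much structural fuel; fuel 0 is reached only where the Python raises (outside Pre_).
def minFront : List Int → List Int
  | [] => []
  | x :: t =>
    match minFront t with
    | [] => [x]
    | y :: r => if x ≤ y then x :: t else y :: x :: r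

def loopA : Nat → List Int → Int → Int → Int
  | 0, _, _, _ => 0                 -- unreachable with fuel = initial length, inside Pre_
  | fuel + 1, h, K, cnt =>
    match h with
    | [] => 0                       -- scoville[0] raises in Python; outside Pre_
    | x :: t =>
      if x < K then
        match minFront t with
        | [] => 0                   -- second heappop raises in Python; outside Pre_
        | b :: t2 =>
          let v := x + b * 2
          let h2 := minFront (t2 ++ [v])
          if h2.length = 1 ∧ v < K then -1
          else loopA fuel h2 K (cnt + 1)
      else cnt

def solution (scoville : List Int) (K : Int) : Int :=
  loopA scoville.length (minFront scoville) K 0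

-- ===== PORT B =====
-- Source B's smallest(): base[-1] = PySem.List.pyGet? base (-1) (none = IndexError on empty
-- input, outside Pre_); mixed[j] = PySem.List.pyGet? mixed j.
def smallestT (base mixed : List Int) (j : Int) : Option Int :=
  if j = (mixed.length : Int) then PySem.List.pyGet? base (-1)
  else if base = [] then PySem.List.pyGet? mixed j
  else match PySem.List.pyGet? base (-1), PySem.List.pyGet? mixed j with
    | some x, some m => some (min x m)
    | _, _ => none

-- Source B's pop(): base.pop() (read base[-1], drop it) unless mixed's front mixed[j] is strictly
-- smaller, which is consumed by advancing j. The .getD 0 defaults are only reached where the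
-- Python would raise, which the loop's guards make unreachable inside Pre_.
def popT (base mixed : List Int) (j : Int) : Int × List Int × Int :=
  if j = (mixed.length : Int) ∨ (base ≠ [] ∧
      (PySem.List.pyGet? base (-1)).getD 0 ≤ (PySem.List.pyGet? mixed j).getD 0) then
    ((PySem.List.pyGet? base (-1)).getD 0, base.dropLast, j)
  else ((PySem.List.pyGet? mixed j).getD 0, base, j + 1)

-- Source B's while loop: the number of stored, unconsumed values shrinks by one per iteration,
-- so structural fuel = initial length suffices; fuel 0 is unreachable inside Pre_.
def loopT : Nat → List Int → List Int → Int → Int → Int → Int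
  | 0, _, _, _, _, _ => 0
  | fuel + 1, base, mixed, j, K, cnt =>
    match smallestT base mixed j with
    | none => 0                     -- smallest() raises in Python; outside Pre_
    | some s =>
      if s < K then
        if (base.length : Int) + ((mixed.length : Int) - j) = 1 then -1
        else
          match popT base mixed j with
          | (a, base1, j1) =>
            match popT base1 mixed j1 with
            | (b, base2, j2) => loopT fuel base2 (mixed ++ [a + 2 * b]) j2 K (cnt + 1)
      else cnt

def solution_alt (scoville : List Int) (K : Int) : Int :=
  loopT scoville.length (PySem.List.sorted scoville (fun x => x) true) [] 0 K 0

-- ===== PRECONDITION & SPEC =====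
-- Pre_ excludes exactly the inputs on which A raises IndexError: the empty list (scoville[0])
-- and a one-element list whose value is below K (the second heappop).
def Pre_solution (scoville : List Int) (K : Int) : Prop :=
  scoville ≠ [] ∧ (scoville.length = 1 → K ≤ scoville.headD 0)
instance (scoville : List Int) (K : Int) : Decidable (Pre_solution scoville K) := by
  unfold Pre_solution; infer_instance

def pvWitness_solution : List Int × Int := ([1, 2, 3, 9, 10, 12], 7)

-- On a one-element list below K, A raises IndexError on the second heappop; B returns -1 (unmixable).
def Raises_solution (scoville : List Int) (K : Int) : Prop :=
  scoville.length = 1 ∧ scoville.headD 0 < K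
instance (scoville : List Int) (K : Int) : Decidable (Raises_solution scoville K) := by
  unfold Raises_solution; infer_instance
def pvRaiseWitness_solution : List Int × Int := ([5], 7)
def pvRaiseWitnessOut_solution : Int := -1

def Spec_solution (scoville : List Int) (K : Int) (out : Int) : Prop := out = solution_alt scoville K
instance (scoville : List Int) (K : Int) (out : Int) : Decidable (Spec_solution scoville K out) := by unfold Spec_solution; infer_instance

-- ===== CLAIM (what is proved, stated in full; the proofs are below) =====
def Claim_equal_solution : Prop := ∀ (scoville : List Int) (K : Int), Dom_solution scoville K → Pre_solution scoville K → Spec_solution scoville K (solution scoville K)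
def Claim_raises_solution : Prop := (∀ (scoville : List Int) (K : Int), Dom_solution scoville K → Raises_solution scoville K → ¬ Pre_solution scoville K) ∧ (Dom_solution (pvRaiseWitness_solution.1) (pvRaiseWitness_solution.2) ∧ Raises_solution (pvRaiseWitness_solution.1) (pvRaiseWitness_solution.2) ∧ solution_alt (pvRaiseWitness_solution.1) (pvRaiseWitness_solution.2) = pvRaiseWitnessOut_solution)

-- ===== LEMMAS AND PROOFS =====

-- Abstract two-queue formulation used by the proofs: the two queues as explicit lists
-- (smallQ/popQ/loopQ); the port's end-of-reversed-list + index form is bridged to it below.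
def smallQ (base mixed : List Int) : Option Int :=
  match base, mixed with
  | [], [] => none
  | b :: _, [] => some b
  | [], m :: _ => some m
  | b :: _, m :: _ => some (min b m)

def popQ (base mixed : List Int) : Int × List Int × List Int :=
  match base, mixed with
  | [], [] => (0, [], [])
  | x :: bt, [] => (x, bt, [])
  | [], m :: mt => (m, [], mt)
  | x :: bt, m :: mt => if x ≤ m then (x, bt, m :: mt) else (m, x :: bt, mt)

def loopQ : Nat → List Int → List Int → Int → Int → Int
  | 0, _, _, _, _ => 0
  | fuel + 1, base, mixed, K, cnt =>
    match smallQ base mixed with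
    | none => 0                     -- smallest() raises in Python; outside Pre_
    | some s =>
      if s < K then
        if base.length + mixed.length = 1 then -1
        else
          match popQ base mixed with
          | (a, b1, m1) =>
            match popQ b1 m1 with
            | (b, b2, m2) => loopQ fuel b2 (m2 ++ [a + 2 * b]) K (cnt + 1)
      else cnt


-- Canonical reference loop: the greedy process on the fully sorted list, with linear insertion.
def insortB (v : Int) : List Int → List Int
  | [] => [v]
  | y :: t => if y ≤ v then y :: insortB v t else v :: y :: t

def loopS : Nat → List Int → Int → Int → Int
  | 0, _, _, _ => 0
  | fuel + 1, s, K, cnt =>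
    match s with
    | [] => 0
    | x :: t =>
      if x < K then
        match t with
        | [] => -1
        | b :: t2 => loopS fuel (insortB (x + 2 * b) t2) K (cnt + 1)
      else cnt

def sortI (l : List Int) : List Int := PySem.List.sorted l (fun x => x) false

theorem sortI_perm (l : List Int) : (sortI l).Perm l :=
  PySem.List.sorted_perm l (fun x => x) false

theorem sortI_pairwise (l : List Int) : (sortI l).Pairwise (· ≤ ·) := by
  have := PySem.List.sorted_pairwise (xs := l) (key := fun x => x)
  simpa using this

theorem sortI_eq {l ys : List Int} (hp : ys.Perm l) (hs : ys.Pairwise (· ≤ ·)) :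
    sortI l = ys := by
  unfold sortI
  exact PySem.List.sorted_id_eq_of_perm_of_pairwise l ys hp hs

theorem sortI_congr {l l' : List Int} (h : l.Perm l') : sortI l = sortI l' := by
  have := sortI_eq (l := l') (ys := sortI l) ((sortI_perm l).trans h) (sortI_pairwise l)
  exact this.symm

theorem minFront_perm (l : List Int) : (minFront l).Perm l := by
  induction l with
  | nil => simp [minFront]
  | cons x t ih =>
    simp only [minFront]
    cases h : minFront t with
    | nil =>
      rw [h] at ih
      rw [ih.nil_eq.symm]
    | cons y r =>
      rw [h] at ih
      by_cases hxy : x ≤ y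
      · simp [hxy]
      · simp only [hxy, if_false]
        exact ((List.Perm.swap x y r).trans (ih.cons x))

theorem minFront_length (l : List Int) : (minFront l).length = l.length :=
  (minFront_perm l).length_eq

theorem minFront_le : ∀ (l : List Int) (b : Int) (t2 : List Int),
    minFront l = b :: t2 → ∀ z ∈ l, b ≤ z := by
  intro l
  induction l with
  | nil => intro b t2 h; cases h
  | cons x t ih =>
    intro b t2 h z hz
    simp only [minFront] at h
    cases hm : minFront t with
    | nil =>
      rw [hm] at h
      have ht : t = [] := by
        have := minFront_length t; rw [hm] at this; simpa using this.symm
      obtain rfl : b = x := by cases h; rfl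
      subst ht
      simp at hz; omega
    | cons y r =>
      rw [hm] at h
      have hyt : ∀ z ∈ t, y ≤ z := ih y r hm
      by_cases hxy : x ≤ y
      · simp only [hxy, if_true] at h
        obtain rfl : b = x := by cases h; rfl
        rcases List.mem_cons.mp hz with rfl | hz
        · exact le_refl _
        · exact le_trans hxy (hyt z hz)
      · simp only [hxy, if_false] at h
        obtain rfl : b = y := by cases h; rfl
        rcases List.mem_cons.mp hz with rfl | hz
        · omega
        · exact hyt z hz

theorem insortB_perm (v : Int) (s : List Int) : (insortB v s).Perm (v :: s) := by
  induction s with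
  | nil => simp [insortB]
  | cons y t ih =>
    simp only [insortB]
    by_cases h : y ≤ v
    · simp only [h, if_true]
      exact (ih.cons y).trans (List.Perm.swap v y t)
    · simp [h]

theorem insortB_pairwise (v : Int) (s : List Int) (hs : s.Pairwise (· ≤ ·)) :
    (insortB v s).Pairwise (· ≤ ·) := by
  induction s with
  | nil => simp [insortB]
  | cons y t ih =>
    rw [List.pairwise_cons] at hs
    obtain ⟨hy, ht⟩ := hs
    simp only [insortB]
    by_cases h : y ≤ v
    · simp only [h, if_true]
      rw [List.pairwise_cons]
      refine ⟨?_, ih ht⟩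
      intro z hz
      rcases List.mem_cons.mp ((insortB_perm v t).mem_iff.mp hz) with rfl | hz'
      · exact h
      · exact hy z hz'
    · simp only [h, if_false]
      rw [List.pairwise_cons]
      refine ⟨?_, List.pairwise_cons.mpr ⟨hy, ht⟩⟩
      intro z hz
      rcases List.mem_cons.mp hz with rfl | hz'
      · omega
      · exact le_trans (by omega) (hy z hz')

-- A's heap loop equals the canonical sorted loop.
theorem AS_lemma : ∀ (fuel : Nat) (h : List Int) (K cnt : Int),
    h.length ≤ fuel →
    (∀ b t2, h = b :: t2 → ∀ z ∈ h, b ≤ z) →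
    (∀ v, h = [v] → K ≤ v) →
    loopA fuel h K cnt = loopS fuel (sortI h) K cnt := by
  intro fuel
  induction fuel with
  | zero => intro h K cnt _ _ _; rfl
  | succ fuel ih =>
    intro h K cnt hlen hmin hsingle
    cases h with
    | nil =>
      have : sortI ([] : List Int) = [] := sortI_eq (List.Perm.refl _) (by simp)
      simp [loopA, loopS, this]
    | cons x t =>
      have hsort : sortI (x :: t) = x :: sortI t := by
        apply sortI_eq ((sortI_perm t).cons x)
        rw [List.pairwise_cons]
        refine ⟨?_, sortI_pairwise t⟩
        intro z hz
        exact hmin x t rfl z (List.mem_cons_of_mem x ((sortI_perm t).mem_iff.mp hz))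
      by_cases hx : x < K
      · cases t with
        | nil =>
          exact absurd (hsingle x rfl) (by omega)
        | cons c t' =>
          cases hm : minFront (c :: t') with
          | nil =>
            exfalso
            have := minFront_length (c :: t'); rw [hm] at this; simp at this
          | cons b t2 =>
            have hpermt : (b :: t2).Perm (c :: t') := by rw [← hm]; exact minFront_perm _
            have hble : ∀ z ∈ (c :: t'), b ≤ z := minFront_le _ b t2 hm
            have hsortT : sortI (c :: t') = b :: sortI t2 := by
              apply sortI_eq (((sortI_perm t2).cons b).trans hpermt)
              rw [List.pairwise_cons]
              refine ⟨?_, sortI_pairwise t2⟩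
              intro z hz
              exact hble z (hpermt.mem_iff.mp
                (List.mem_cons_of_mem b ((sortI_perm t2).mem_iff.mp hz)))
            set v : Int := x + b * 2 with hv
            have hv2 : x + 2 * b = v := by rw [hv]; ring
            have hins : insortB (x + 2 * b) (sortI t2) = sortI (t2 ++ [v]) := by
              rw [hv2]
              symm
              apply sortI_eq
              · exact (insortB_perm v (sortI t2)).trans
                  (((sortI_perm t2).cons v).trans (List.perm_append_singleton v t2).symm)
              · exact insortB_pairwise v _ (sortI_pairwise t2)
            have hBstep : loopS (fuel + 1) (sortI (x :: c :: t')) K cnt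
                = loopS fuel (sortI (t2 ++ [v])) K (cnt + 1) := by
              rw [hsort, hsortT]
              simp [loopS, hx, hins]
            have h2perm : (minFront (t2 ++ [v])).Perm (t2 ++ [v]) := minFront_perm _
            have h2len : (minFront (t2 ++ [v])).length = t2.length + 1 := by
              rw [minFront_length]; simp
            have hAstep : loopA (fuel + 1) (x :: c :: t') K cnt
                = if (minFront (t2 ++ [v])).length = 1 ∧ v < K then -1
                  else loopA fuel (minFront (t2 ++ [v])) K (cnt + 1) := by
              simp [loopA, hx, hm, ← hv]
            rw [hAstep, hBstep]
            by_cases hg : (minFront (t2 ++ [v])).length = 1 ∧ v < K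
            · obtain ⟨hg1, hg2⟩ := hg
              have ht2 : t2 = [] := by
                rw [h2len] at hg1; simpa using List.length_eq_zero_iff.mp (by omega)
              subst ht2
              have hs1 : sortI ([] ++ [v]) = [v] := sortI_eq (List.Perm.refl _) (by simp)
              have hlenx := hlen
              simp only [List.length_cons] at hlenx
              cases fuel with
              | zero => omega
              | succ f' =>
                rw [if_pos (⟨hg1, hg2⟩ : _ ∧ _), hs1]
                simp [loopS, hg2]
            · simp only [hg, if_false]
              have hlen2 : (minFront (t2 ++ [v])).length ≤ fuel := by
                have hl := hpermt.length_eq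
                have hlenx := hlen
                simp only [List.length_cons] at hl hlenx
                rw [h2len]; omega
              have hmin2 : ∀ b' t2', minFront (t2 ++ [v]) = b' :: t2' →
                  ∀ z ∈ minFront (t2 ++ [v]), b' ≤ z := by
                intro b' t2' he z hz
                exact minFront_le _ b' t2' he z (h2perm.mem_iff.mp hz)
              have hsingle2 : ∀ w, minFront (t2 ++ [v]) = [w] → K ≤ w := by
                intro w he
                have hp : (t2 ++ [v]).Perm [w] := (h2perm.symm.trans (by rw [he])).symm.symm
                have ht2 : t2 = [] := by
                  simpa using hp.length_eq
                subst ht2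
                have hwv : w = v := by simp at hp; simp [hp]
                subst hwv
                rw [he] at hg
                simp at hg
                omega
              rw [ih _ K (cnt + 1) hlen2 hmin2 hsingle2]
              rw [sortI_congr h2perm]
      · rw [hsort]
        simp [loopA, loopS, hx]

-- The two-queue invariant: both queues are sorted, later mixed values are at most three
-- times earlier ones, and every mixed value is at most three times every base value.
def InvT (base mixed : List Int) : Prop :=
  base.Pairwise (· ≤ ·) ∧ mixed.Pairwise (· ≤ ·) ∧
  mixed.Pairwise (fun e l => l ≤ 3 * e) ∧
  (∀ w ∈ mixed, ∀ z ∈ base, w ≤ 3 * z)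

theorem popQ_spec (base mixed : List Int) (hne : base ++ mixed ≠ []) (hinv : InvT base mixed) :
    ((popQ base mixed).1 :: ((popQ base mixed).2.1 ++ (popQ base mixed).2.2)).Perm (base ++ mixed)
    ∧ (∀ z ∈ base ++ mixed, (popQ base mixed).1 ≤ z)
    ∧ InvT (popQ base mixed).2.1 (popQ base mixed).2.2
    ∧ (∀ w ∈ (popQ base mixed).2.2, w ≤ 3 * (popQ base mixed).1)
    ∧ (∀ z ∈ (popQ base mixed).2.1, z ∈ base)
    ∧ (∀ w ∈ (popQ base mixed).2.2, w ∈ mixed) := by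
  obtain ⟨hb, hm, hm3, hbm⟩ := hinv
  cases base with
  | nil =>
    cases mixed with
    | nil => exact absurd rfl hne
    | cons m mt =>
      rw [List.pairwise_cons] at hm
      have hm3' := List.pairwise_cons.mp hm3
      simp only [popQ]
      refine ⟨by simp, ?_, ⟨by simp, hm.2, hm3'.2, by simp⟩, hm3'.1, by simp,
        fun w hw => List.mem_cons_of_mem m hw⟩
      intro z hz
      rcases (by simpa using hz : z = m ∨ z ∈ mt) with rfl | h
      · exact le_refl _
      · exact hm.1 z h
  | cons x bt =>
    rw [List.pairwise_cons] at hb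
    cases mixed with
    | nil =>
      simp only [popQ]
      refine ⟨by simp, ?_, ⟨hb.2, by simp, by simp, by simp⟩, by simp,
        fun z hz => List.mem_cons_of_mem x hz, by simp⟩
      intro z hz
      rcases (by simpa using hz : z = x ∨ z ∈ bt) with rfl | h
      · exact le_refl _
      · exact hb.1 z h
    | cons m mt =>
      rw [List.pairwise_cons] at hm
      have hm3' := List.pairwise_cons.mp hm3
      by_cases hxm : x ≤ m
      · simp only [popQ, if_pos hxm]
        refine ⟨by simp, ?_, ?_, ?_, fun z hz => List.mem_cons_of_mem x hz, fun w hw => hw⟩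
        · intro z hz
          rcases (by simpa using hz : z = x ∨ z ∈ bt ∨ (z = m ∨ z ∈ mt)) with rfl | h | rfl | h
          · exact le_refl _
          · exact hb.1 z h
          · exact hxm
          · exact le_trans hxm (hm.1 z h)
        · exact ⟨hb.2, List.pairwise_cons.mpr hm, List.pairwise_cons.mpr hm3',
            fun w hw z hz => hbm w hw z (List.mem_cons_of_mem x hz)⟩
        · intro w hw
          exact hbm w hw x List.mem_cons_self
      · simp only [popQ, if_neg hxm]
        refine ⟨?_, ?_, ?_, hm3'.1, fun z hz => hz, fun w hw => List.mem_cons_of_mem m hw⟩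
        · simpa using (List.perm_middle (a := m) (l₁ := x :: bt) (l₂ := mt)).symm
        · intro z hz
          rcases (by simpa using hz : z = x ∨ z ∈ bt ∨ (z = m ∨ z ∈ mt)) with rfl | h | rfl | h
          · omega
          · exact le_trans (by omega) (hb.1 z h)
          · exact le_refl _
          · exact hm.1 z h
        · refine ⟨List.pairwise_cons.mpr hb, hm.2, hm3'.2, ?_⟩
          intro w hw z hz
          rcases (by simpa using hz : z = x ∨ z ∈ bt) with rfl | h
          · exact hbm w (List.mem_cons_of_mem m hw) z List.mem_cons_self
          · exact hbm w (List.mem_cons_of_mem m hw) z (List.mem_cons_of_mem x h)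

theorem smallQ_popQ (base mixed : List Int) (hne : base ++ mixed ≠ []) :
    smallQ base mixed = some (popQ base mixed).1 := by
  match base, mixed with
  | [], [] => exact absurd rfl hne
  | x :: bt, [] => rfl
  | [], m :: mt => rfl
  | x :: bt, m :: mt =>
    by_cases h : x ≤ m
    · simp [smallQ, popQ, h]
    · simp [smallQ, popQ, h]
      omega

theorem sortI_nil : sortI [] = [] := sortI_eq (List.Perm.refl _) (by simp)

theorem sortI_head {l : List Int} {v : Int} {b' m' : List Int}
    (hperm : (v :: (b' ++ m')).Perm l) (hle : ∀ z ∈ l, v ≤ z) :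
    sortI l = v :: sortI (b' ++ m') := by
  apply sortI_eq
  · exact ((sortI_perm _).cons v).trans hperm
  · rw [List.pairwise_cons]
    refine ⟨?_, sortI_pairwise _⟩
    intro z hz
    exact hle z (hperm.mem_iff.mp (List.mem_cons_of_mem v ((sortI_perm _).mem_iff.mp hz)))

-- B's two-queue loop equals the canonical sorted loop.
theorem TS_lemma : ∀ (fuel : Nat) (base mixed : List Int) (K cnt : Int),
    InvT base mixed →
    loopQ fuel base mixed K cnt = loopS fuel (sortI (base ++ mixed)) K cnt := by
  intro fuel
  induction fuel with
  | zero => intro base mixed K cnt _; rfl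
  | succ fuel ih =>
    intro base mixed K cnt hinv
    by_cases hne : base ++ mixed = []
    · rw [List.append_eq_nil_iff] at hne
      obtain ⟨rfl, rfl⟩ := hne
      simp [loopQ, loopS, smallQ, sortI_nil]
    · rcases hp : popQ base mixed with ⟨a, b1, m1⟩
      have hspec := popQ_spec base mixed hne hinv
      rw [hp] at hspec
      obtain ⟨hp1, hp2, hp3, hp4, hpb, hpm⟩ := hspec
      have hsmall : smallQ base mixed = some a := by
        rw [smallQ_popQ base mixed hne, hp]
      have hsp : sortI (base ++ mixed) = a :: sortI (b1 ++ m1) := sortI_head hp1 hp2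
      rw [hsp]
      by_cases hK : a < K
      · by_cases hone : base.length + mixed.length = 1
        · have hnil : b1 ++ m1 = [] := by
            have hlen := hp1.length_eq
            simp only [List.length_cons, List.length_append] at hlen
            have : (b1 ++ m1).length = 0 := by
              simp only [List.length_append]; omega
            exact List.length_eq_zero_iff.mp this
          rw [hnil, sortI_nil]
          simp [loopQ, loopS, hsmall, hK, hone]
        · have hne1 : b1 ++ m1 ≠ [] := by
            intro hnil
            have hlen := hp1.length_eq
            rw [hnil] at hlen
            simp only [List.length_cons, List.length_append, List.length_nil] at hlen
            omega
          rcases hq : popQ b1 m1 with ⟨b, b2, m2⟩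
          have hspec2 := popQ_spec b1 m1 hne1 hp3
          rw [hq] at hspec2
          obtain ⟨hq1, hq2, hq3, hq4, hqb, hqm⟩ := hspec2
          have hsq : sortI (b1 ++ m1) = b :: sortI (b2 ++ m2) := sortI_head hq1 hq2
          have hab : a ≤ b :=
            hp2 b (hp1.mem_iff.mp (List.mem_cons_of_mem a (hq1.mem_iff.mp List.mem_cons_self)))
          have hTstep : loopQ (fuel + 1) base mixed K cnt
              = loopQ fuel b2 (m2 ++ [a + 2 * b]) K (cnt + 1) := by
            simp [loopQ, hsmall, hK, hone, hp, hq]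
          have hSstep : loopS (fuel + 1) (a :: sortI (b1 ++ m1)) K cnt
              = loopS fuel (insortB (a + 2 * b) (sortI (b2 ++ m2))) K (cnt + 1) := by
            rw [hsq]
            simp [loopS, hK]
          have hins : insortB (a + 2 * b) (sortI (b2 ++ m2)) = sortI (b2 ++ (m2 ++ [a + 2 * b])) := by
            symm
            apply sortI_eq
            · exact (insortB_perm _ _).trans (((sortI_perm _).cons _).trans
                (((List.perm_append_singleton _ _).symm).trans (by rw [List.append_assoc])))
            · exact insortB_pairwise _ _ (sortI_pairwise _)
          obtain ⟨hb2s, hm2s, hm2p3, hm2b⟩ := hq3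
          have hinv' : InvT b2 (m2 ++ [a + 2 * b]) := by
            refine ⟨hb2s, ?_, ?_, ?_⟩
            · rw [List.pairwise_append]
              refine ⟨hm2s, by simp, ?_⟩
              intro w hw z hz
              rcases (by simpa using hz : z = a + 2 * b) with rfl
              have h1 : w ≤ 3 * a := hp4 w (hqm w hw)
              have h2 : w ≤ 3 * b := hq4 w hw
              omega
            · rw [List.pairwise_append]
              refine ⟨hm2p3, by simp, ?_⟩
              intro w hw z hz
              rcases (by simpa using hz : z = a + 2 * b) with rfl
              have hbw : b ≤ w := hq2 w (List.mem_append_right b1 (hqm w hw))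
              omega
            · intro w hw z hz
              rcases (List.mem_append.mp hw) with h | h
              · exact hm2b w h z hz
              · rcases (by simpa using h : w = a + 2 * b) with rfl
                have hbz : b ≤ z := hq2 z (List.mem_append_left m1 (hqb z hz))
                omega
          rw [hTstep, hSstep, hins, ih _ _ K (cnt + 1) hinv']
      · have hT : loopQ (fuel + 1) base mixed K cnt = cnt := by
          simp [loopQ, hsmall, hK]
        rw [hT]
        simp [loopS, hK]

-- Bridge: the port's state (descending base read from the end, mixed consumed via the
-- index j) corresponds to the abstract queues (base.reverse, mixed.drop j.toNat).
theorem smallestT_bridge (base mixed : List Int) (j : Int) (h0 : 0 ≤ j)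
    (hle : j ≤ (mixed.length : Int)) :
    smallestT base mixed j = smallQ base.reverse (mixed.drop j.toNat) := by
  obtain ⟨n, rfl⟩ : ∃ n : Nat, j = (n : Int) := ⟨j.toNat, (Int.toNat_of_nonneg h0).symm⟩
  rw [Int.toNat_natCast]
  by_cases hj : (n : Int) = (mixed.length : Int)
  · have hd : mixed.drop n = [] := by
      apply List.drop_eq_nil_of_le; omega
    by_cases hbe : base = []
    · subst hbe
      simp [smallestT, smallQ, hj, hd, PySem.List.pyGet?_neg_one]
    · cases hb : base.reverse with
      | nil => exact absurd (by simpa using congrArg List.reverse hb) hbe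
      | cons x bt =>
        have hlast : PySem.List.pyGet? base (-1) = some x := by
          rw [PySem.List.pyGet?_neg_one, ← List.head?_reverse, hb]; rfl
        simp [smallestT, smallQ, hj, hd, hlast]
  · have hn : n < mixed.length := by omega
    cases hdm : mixed.drop n with
    | nil =>
      exfalso
      have := congrArg List.length hdm
      simp at this
      omega
    | cons m mt =>
      have hget : PySem.List.pyGet? mixed (n : Int) = some m := by
        rw [PySem.List.pyGet?_natCast, ← List.head?_drop, hdm]; rfl
      by_cases hbe : base = []
      · subst hbe
        simp [smallestT, smallQ, hj, hget]
      · cases hb : base.reverse with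
        | nil => exact absurd (by simpa using congrArg List.reverse hb) hbe
        | cons x bt =>
          have hlast : PySem.List.pyGet? base (-1) = some x := by
            rw [PySem.List.pyGet?_neg_one, ← List.head?_reverse, hb]; rfl
          simp [smallestT, smallQ, hj, hbe, hget, hlast]

theorem popT_bridge (base mixed : List Int) (j : Int) (h0 : 0 ≤ j)
    (hle : j ≤ (mixed.length : Int)) :
    popQ base.reverse (mixed.drop j.toNat)
      = ((popT base mixed j).1, (popT base mixed j).2.1.reverse,
         mixed.drop (popT base mixed j).2.2.toNat)
    ∧ 0 ≤ (popT base mixed j).2.2 ∧ (popT base mixed j).2.2 ≤ (mixed.length : Int) := by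
  obtain ⟨n, rfl⟩ : ∃ n : Nat, j = (n : Int) := ⟨j.toNat, (Int.toNat_of_nonneg h0).symm⟩
  rw [Int.toNat_natCast]
  by_cases hj : (n : Int) = (mixed.length : Int)
  · have hd : mixed.drop n = [] := by
      apply List.drop_eq_nil_of_le; omega
    have hpt : popT base mixed (n : Int)
        = ((PySem.List.pyGet? base (-1)).getD 0, base.dropLast, (n : Int)) := by
      simp [popT, hj]
    rw [hpt, hd]
    refine ⟨?_, by first | (simp; omega) | simp, by first | (simp; omega) | simp⟩
    by_cases hbe : base = []
    · subst hbe
      simp [popQ, PySem.List.pyGet?_neg_one, Int.toNat_natCast, hd]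
    · cases hb : base.reverse with
      | nil => exact absurd (by simpa using congrArg List.reverse hb) hbe
      | cons x bt =>
        have hlast : PySem.List.pyGet? base (-1) = some x := by
          rw [PySem.List.pyGet?_neg_one, ← List.head?_reverse, hb]; rfl
        have htail : base.dropLast.reverse = bt := by
          rw [← List.tail_reverse, hb]; rfl
        simp [popQ, hlast, htail, Int.toNat_natCast, hd]
  · have hn : n < mixed.length := by omega
    cases hdm : mixed.drop n with
    | nil =>
      exfalso
      have := congrArg List.length hdm
      simp at this
      omega
    | cons m mt =>
      have hget : PySem.List.pyGet? mixed (n : Int) = some m := by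
        rw [PySem.List.pyGet?_natCast, ← List.head?_drop, hdm]; rfl
      have hmt : mixed.drop (n + 1) = mt := by
        rw [← List.tail_drop, hdm]; rfl
      have hsucc : ((n : Int) + 1).toNat = n + 1 := by omega
      by_cases hbe : base = []
      · have hpt : popT base mixed (n : Int) = (m, base, (n : Int) + 1) := by
          simp [popT, hj, hbe, hget]
        rw [hpt]
        refine ⟨?_, by first | (simp; omega) | simp, by first | (simp; omega) | simp⟩
        subst hbe
        simp [popQ, hdm, hsucc, hmt]
      · cases hb : base.reverse with
        | nil => exact absurd (by simpa using congrArg List.reverse hb) hbe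
        | cons x bt =>
          have hlast : PySem.List.pyGet? base (-1) = some x := by
            rw [PySem.List.pyGet?_neg_one, ← List.head?_reverse, hb]; rfl
          have htail : base.dropLast.reverse = bt := by
            rw [← List.tail_reverse, hb]; rfl
          by_cases hxm : x ≤ m
          · have hpt : popT base mixed (n : Int) = (x, base.dropLast, (n : Int)) := by
              simp [popT, hj, hbe, hget, hlast, hxm]
            rw [hpt]
            refine ⟨?_, by first | (simp; omega) | simp, by first | (simp; omega) | simp⟩
            simp [popQ, hb, hdm, htail, Int.toNat_natCast, hxm]
          · have hpt : popT base mixed (n : Int) = (m, base, (n : Int) + 1) := by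
              simp [popT, hj, hbe, hget, hlast]
              omega
            rw [hpt]
            refine ⟨?_, by first | (simp; omega) | simp, by first | (simp; omega) | simp⟩
            simp [popQ, hb, hdm, hsucc, hmt, hxm]

theorem loop_bridge : ∀ (fuel : Nat) (base mixed : List Int) (j K cnt : Int),
    0 ≤ j → j ≤ (mixed.length : Int) →
    loopT fuel base mixed j K cnt = loopQ fuel base.reverse (mixed.drop j.toNat) K cnt := by
  intro fuel
  induction fuel with
  | zero => intro base mixed j K cnt _ _; rfl
  | succ fuel ih =>
    intro base mixed j K cnt h0 hle
    have hsm := smallestT_bridge base mixed j h0 hle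
    cases hs : smallQ base.reverse (mixed.drop j.toNat) with
    | none =>
      rw [hs] at hsm
      simp [loopT, loopQ, hsm, hs]
    | some s =>
      rw [hs] at hsm
      by_cases hK : s < K
      · by_cases hone : (base.length : Int) + ((mixed.length : Int) - j) = 1
        · have honeQ : base.length + (mixed.length - j.toNat) = 1 := by omega
          simp [loopT, loopQ, hsm, hs, hK, hone, honeQ]
        · have honeQ : ¬ (base.length + (mixed.length - j.toNat) = 1) := by omega
          rcases hp : popT base mixed j with ⟨a, base1, j1⟩
          have hbr := popT_bridge base mixed j h0 hle
          rw [hp] at hbr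
          dsimp only at hbr
          obtain ⟨hpq, hj10, hj1le⟩ := hbr
          rcases hq : popT base1 mixed j1 with ⟨b, base2, j2⟩
          have hbr2 := popT_bridge base1 mixed j1 hj10 hj1le
          rw [hq] at hbr2
          dsimp only at hbr2
          obtain ⟨hqq, hj20, hj2le⟩ := hbr2
          have hdrop : (mixed ++ [a + 2 * b]).drop j2.toNat
              = mixed.drop j2.toNat ++ [a + 2 * b] := by
            apply List.drop_append_of_le_length
            omega
          have hT : loopT (fuel + 1) base mixed j K cnt
              = loopT fuel base2 (mixed ++ [a + 2 * b]) j2 K (cnt + 1) := by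
            simp [loopT, hsm, hK, hone, hp, hq]
          have hQ : loopQ (fuel + 1) base.reverse (mixed.drop j.toNat) K cnt
              = loopQ fuel base2.reverse (mixed.drop j2.toNat ++ [a + 2 * b]) K (cnt + 1) := by
            simp [loopQ, hs, hK, honeQ, hpq, hqq]
          rw [hT, hQ, ih base2 (mixed ++ [a + 2 * b]) j2 K (cnt + 1) hj20
            (by simp; omega), hdrop]
      · simp [loopT, loopQ, hsm, hs, hK]

-- ===== VERDICT (by name: the statement is the Claim_ definition above) =====
theorem solution_spec : Claim_equal_solution := by
  intro s K _ hpre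
  unfold Spec_solution solution solution_alt
  have hperm := minFront_perm s
  have hlen : (minFront s).length ≤ s.length := by rw [minFront_length]
  have hmin : ∀ b t2, minFront s = b :: t2 → ∀ z ∈ minFront s, b ≤ z := by
    intro b t2 he z hz
    exact minFront_le s b t2 he z (hperm.mem_iff.mp hz)
  have hsingle : ∀ v, minFront s = [v] → K ≤ v := by
    intro v he
    have hs : s = [v] := by
      have : s.Perm [v] := (hperm.symm.trans (by rw [he])).symm.symm
      exact List.perm_singleton.mp this
    have := hpre.2 (by rw [hs]; rfl)
    rw [hs] at this
    simpa using this
  rw [AS_lemma s.length (minFront s) K 0 hlen hmin hsingle]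
  rw [sortI_congr hperm]
  have hB : loopT s.length (PySem.List.sorted s (fun x => x) true) [] 0 K 0
      = loopS s.length (sortI s) K 0 := by
    set rb := (PySem.List.sorted s (fun x => x) true).reverse with hrb
    have hperm_rb : rb.Perm s :=
      (List.reverse_perm _).trans (PySem.List.sorted_perm s (fun x => x) true)
    have hsorted_rb : rb.Pairwise (· ≤ ·) := by
      rw [hrb, List.pairwise_reverse]
      exact PySem.List.sorted_pairwise_rev (xs := s) (key := fun x => x)
    have h0 : InvT rb [] := ⟨hsorted_rb, by simp, by simp, by simp⟩
    rw [loop_bridge s.length (PySem.List.sorted s (fun x => x) true) [] 0 K 0 le_rfl (by simp)]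
    have := TS_lemma s.length rb [] K 0 h0
    rw [List.append_nil] at this
    rw [show ((0 : Int)).toNat = 0 from rfl, List.drop_nil, ← hrb, this, sortI_congr hperm_rb]
  rw [hB]

@[simp] theorem solution_raises : Claim_raises_solution := by
  unfold Claim_raises_solution
  constructor
  · intro s K _ hr hp
    rcases hr with ⟨h1, h2⟩
    exact absurd (hp.2 h1) (by omega)
  · exact ⟨by decide, by decide, by decide⟩
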